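-- pv_equiv track=rewrite | github.com/AlanSCorreia/fnaf-1-clone | src/systems/bitmask.py | filter_entities_components
-- ===== SOURCE A (Python) =====
-- def has_component(entity_mask,
-- 				  components):
--
--     return (entity_mask & components) == components
--
-- def has_all_components(entities_mask,
-- 					   bit_masks):
--
-- 	return all(has_component(entities_mask, bit_mask)
-- 			   for bit_mask in bit_masks)
--
-- def has_any_components(entities_mask,
-- 					   bit_masks):
--
--     return any(has_component(entities_mask, bit_mask)
-- 			   for bit_mask in bit_masks)
--
-- def filter_entities_components(entities_id,
-- 							   accept_bit_masks,#: list[str],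
-- 							   rejected_bit_masks,# : list[str] | None,
-- 							   entities_mask):# : dict
--
-- 	result = []
--
-- 	for entity_id in entities_id:
-- 		if accept_bit_masks:
-- 			if rejected_bit_masks:
-- 				if has_all_components(entities_mask[entity_id], accept_bit_masks)\
-- 				and not has_any_components(entities_mask[entity_id], rejected_bit_masks):
-- 					result.append(entity_id)
--
-- 			else:
-- 				if has_all_components(entities_mask[entity_id], accept_bit_masks):
-- 					result.append(entity_id)
--
-- 	return result
-- ===== SOURCE B (Python) =====
-- def filter_entities_components(entities_id,
--                                accept_bit_masks,
--                                rejected_bit_masks,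
--                                entities_mask):
--     if not accept_bit_masks:
--         return []
--     combined = 0
--     for m in accept_bit_masks:
--         combined |= m
--     rejected = rejected_bit_masks or []
--     return [entity_id for entity_id in entities_id
--             if (entities_mask[entity_id] & combined) == combined
--             and not any((entities_mask[entity_id] & r) == r for r in rejected)]
-- ===== Notes on version B (the rewrite author's own statement) =====
-- stated objective: alternative
-- what changed: B folds all accept masks into one combined OR-mask before the entity loop and then filters the entities with a single containment test (plus the rejected-mask check) per entity, instead of A's accumulator loop that re-scans the whole accept list for every entity.
import Mathlib
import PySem

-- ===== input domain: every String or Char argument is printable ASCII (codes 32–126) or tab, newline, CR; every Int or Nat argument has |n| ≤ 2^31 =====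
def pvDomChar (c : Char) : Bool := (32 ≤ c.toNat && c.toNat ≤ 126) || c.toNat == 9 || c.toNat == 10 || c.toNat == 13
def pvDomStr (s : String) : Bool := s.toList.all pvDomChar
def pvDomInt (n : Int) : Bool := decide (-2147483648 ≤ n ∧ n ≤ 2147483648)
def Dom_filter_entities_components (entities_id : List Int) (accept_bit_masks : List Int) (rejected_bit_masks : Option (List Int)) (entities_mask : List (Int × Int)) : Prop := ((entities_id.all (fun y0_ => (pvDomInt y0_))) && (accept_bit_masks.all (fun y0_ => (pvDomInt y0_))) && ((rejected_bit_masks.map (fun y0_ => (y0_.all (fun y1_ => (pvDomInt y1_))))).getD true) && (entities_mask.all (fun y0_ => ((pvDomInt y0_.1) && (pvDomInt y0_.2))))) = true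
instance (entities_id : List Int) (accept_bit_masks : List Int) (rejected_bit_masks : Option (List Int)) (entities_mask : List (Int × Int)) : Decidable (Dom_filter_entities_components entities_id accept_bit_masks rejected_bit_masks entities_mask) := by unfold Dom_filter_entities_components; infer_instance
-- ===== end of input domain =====

-- B folds the accept masks into one combined OR-mask and filters the entities with a single
-- containment test per entity (objective: alternative decomposition; no mutation involved).

-- ===== PORT A =====
def has_component (entity_mask : Int) (components : Int) : Bool :=
  (PySem.Int.band entity_mask components) == components

def has_all_components (entities_mask : Int) (bit_masks : List Int) : Bool :=
  bit_masks.all (fun bit_mask => has_component entities_mask bit_mask)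

def has_any_components (entities_mask : Int) (bit_masks : List Int) : Bool :=
  bit_masks.any (fun bit_mask => has_component entities_mask bit_mask)

-- entities_mask[entity_id] is a dict lookup (first match); a missing key (KeyError) is excluded
-- by Pre_, so the .getD 0 default is never reached on admitted inputs.
def filter_entities_components (entities_id : List Int) (accept_bit_masks : List Int) (rejected_bit_masks : Option (List Int)) (entities_mask : List (Int × Int)) : List Int :=
  entities_id.foldl (fun result entity_id =>
    if !accept_bit_masks.isEmpty then
      if (match rejected_bit_masks with | some rl => !rl.isEmpty | none => false) then
        if has_all_components ((entities_mask.lookup entity_id).getD 0) accept_bit_masks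
            && !(has_any_components ((entities_mask.lookup entity_id).getD 0) (rejected_bit_masks.getD [])) then
          result ++ [entity_id]
        else result
      else
        if has_all_components ((entities_mask.lookup entity_id).getD 0) accept_bit_masks then
          result ++ [entity_id]
        else result
    else result) []

-- ===== PORT B =====
def filter_entities_components_alt (entities_id : List Int) (accept_bit_masks : List Int) (rejected_bit_masks : Option (List Int)) (entities_mask : List (Int × Int)) : List Int :=
  if accept_bit_masks.isEmpty then []
  else
    let combined := accept_bit_masks.foldl (fun c m => PySem.Int.bor c m) 0
    let rejected := match rejected_bit_masks with | some rl => rl | none => []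
    entities_id.filter (fun entity_id =>
      (PySem.Int.band ((entities_mask.lookup entity_id).getD 0) combined == combined)
      && !(rejected.any (fun r => PySem.Int.band ((entities_mask.lookup entity_id).getD 0) r == r)))

-- ===== PRECONDITION & SPEC =====
-- Pre_ excludes exactly the KeyError inputs: when the accept list is non-empty (truthy), Python A
-- looks every entity id up in entities_mask and raises KeyError on an id that is not a key.
def Pre_filter_entities_components (entities_id : List Int) (accept_bit_masks : List Int) (rejected_bit_masks : Option (List Int)) (entities_mask : List (Int × Int)) : Prop :=
  accept_bit_masks ≠ [] → ∀ e ∈ entities_id, e ∈ entities_mask.map Prod.fst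
instance (entities_id : List Int) (accept_bit_masks : List Int) (rejected_bit_masks : Option (List Int)) (entities_mask : List (Int × Int)) : Decidable (Pre_filter_entities_components entities_id accept_bit_masks rejected_bit_masks entities_mask) := by unfold Pre_filter_entities_components; infer_instance

def pvWitness_filter_entities_components : List Int × List Int × Option (List Int) × (List (Int × Int)) :=
  ([1, 2], [1], some [4], [(1, 3), (2, 4)])

def Spec_filter_entities_components (entities_id : List Int) (accept_bit_masks : List Int) (rejected_bit_masks : Option (List Int)) (entities_mask : List (Int × Int)) (out : List Int) : Prop := out = filter_entities_components_alt entities_id accept_bit_masks rejected_bit_masks entities_mask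
instance (entities_id : List Int) (accept_bit_masks : List Int) (rejected_bit_masks : Option (List Int)) (entities_mask : List (Int × Int)) (out : List Int) : Decidable (Spec_filter_entities_components entities_id accept_bit_masks rejected_bit_masks entities_mask out) := by unfold Spec_filter_entities_components; infer_instance

-- ===== CLAIM (what is proved, stated in full; the proofs are below) =====
def Claim_equal_filter_entities_components : Prop := ∀ (entities_id : List Int) (accept_bit_masks : List Int) (rejected_bit_masks : Option (List Int)) (entities_mask : List (Int × Int)), Dom_filter_entities_components entities_id accept_bit_masks rejected_bit_masks entities_mask → Pre_filter_entities_components entities_id accept_bit_masks rejected_bit_masks entities_mask → Spec_filter_entities_components entities_id accept_bit_masks rejected_bit_masks entities_mask (filter_entities_components entities_id accept_bit_masks rejected_bit_masks entities_mask)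

-- ===== LEMMAS AND PROOFS =====

theorem nat_and_add_ldiff (m : Nat) : ∀ n : Nat, (m &&& n) + Nat.ldiff m n = m := by
  induction m using Nat.binaryRec with
  | zero =>
    intro n
    have h2 : Nat.ldiff 0 n = 0 :=
      Nat.eq_of_testBit_eq (fun i => by simp [Nat.testBit_ldiff])
    simp [Nat.zero_and, h2]
  | bit b m ih =>
    intro n
    induction n using Nat.bitCasesOn with
    | _ c n =>
      rw [Nat.land_bit b m c n, Nat.ldiff_bit b m c n]
      have := ih n
      cases b <;> cases c <;> simp [Nat.bit_val] at * <;> omega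

theorem band_eq_land (a b : Int) : PySem.Int.band a b = Int.land a b := by
  unfold PySem.Int.band
  cases a with
  | ofNat m =>
    have c1 : 0 ≤ Int.ofNat m := Int.natCast_nonneg m
    cases b with
    | ofNat n =>
      have c2 : 0 ≤ Int.ofNat n := Int.natCast_nonneg n
      rw [if_pos c1, if_pos c2]
      rfl
    | negSucc n =>
      have c2 : ¬ 0 ≤ Int.negSucc n := by rw [Int.negSucc_eq]; omega
      rw [if_pos c1, if_neg c2]
      have hland : Int.land (Int.ofNat m) (Int.negSucc n) = ((Nat.ldiff m n : Nat) : Int) := rfl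
      have ht : ((-Int.negSucc n - 1).toNat) = n := by rw [Int.negSucc_eq]; omega
      have hm : (Int.ofNat m).toNat = m := rfl
      rw [hland, ht, hm]
      have hadd := nat_and_add_ldiff m n
      have hle : (m &&& n) ≤ m := Nat.and_le_left
      omega
  | negSucc m =>
    have c1 : ¬ 0 ≤ Int.negSucc m := by rw [Int.negSucc_eq]; omega
    cases b with
    | ofNat n =>
      have c2 : 0 ≤ Int.ofNat n := Int.natCast_nonneg n
      rw [if_neg c1, if_pos c2]
      have hland : Int.land (Int.negSucc m) (Int.ofNat n) = ((Nat.ldiff n m : Nat) : Int) := rfl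
      have ht : ((-Int.negSucc m - 1).toNat) = m := by rw [Int.negSucc_eq]; omega
      have hn : (Int.ofNat n).toNat = n := rfl
      rw [hland, ht, hn]
      have hadd := nat_and_add_ldiff n m
      have hle : (n &&& m) ≤ n := Nat.and_le_left
      omega
    | negSucc n =>
      have c2 : ¬ 0 ≤ Int.negSucc n := by rw [Int.negSucc_eq]; omega
      rw [if_neg c1, if_neg c2]
      have hland : Int.land (Int.negSucc m) (Int.negSucc n) = Int.negSucc (m ||| n) := rfl
      have hm : ((-Int.negSucc m - 1).toNat) = m := by rw [Int.negSucc_eq]; omega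
      have hn : ((-Int.negSucc n - 1).toNat) = n := by rw [Int.negSucc_eq]; omega
      rw [hland, hm, hn, Int.negSucc_eq]
      omega

theorem bor_eq_lor (a b : Int) : PySem.Int.bor a b = Int.lor a b := by
  unfold PySem.Int.bor
  cases a with
  | ofNat m =>
    have c1 : 0 ≤ Int.ofNat m := Int.natCast_nonneg m
    cases b with
    | ofNat n =>
      have c2 : 0 ≤ Int.ofNat n := Int.natCast_nonneg n
      rw [if_pos c1, if_pos c2]
      rfl
    | negSucc n =>
      have c2 : ¬ 0 ≤ Int.negSucc n := by rw [Int.negSucc_eq]; omega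
      rw [if_pos c1, if_neg c2]
      have hlor : Int.lor (Int.ofNat m) (Int.negSucc n) = Int.negSucc (Nat.ldiff n m) := rfl
      have ht : ((-Int.negSucc n - 1).toNat) = n := by rw [Int.negSucc_eq]; omega
      have hm : (Int.ofNat m).toNat = m := rfl
      rw [hlor, ht, hm, Int.negSucc_eq]
      have hadd := nat_and_add_ldiff n m
      have hle : (n &&& m) ≤ n := Nat.and_le_left
      omega
  | negSucc m =>
    have c1 : ¬ 0 ≤ Int.negSucc m := by rw [Int.negSucc_eq]; omega
    cases b with
    | ofNat n =>
      have c2 : 0 ≤ Int.ofNat n := Int.natCast_nonneg n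
      rw [if_neg c1, if_pos c2]
      have hlor : Int.lor (Int.negSucc m) (Int.ofNat n) = Int.negSucc (Nat.ldiff m n) := rfl
      have ht : ((-Int.negSucc m - 1).toNat) = m := by rw [Int.negSucc_eq]; omega
      have hn : (Int.ofNat n).toNat = n := rfl
      rw [hlor, ht, hn, Int.negSucc_eq]
      have hadd := nat_and_add_ldiff m n
      have hle : (m &&& n) ≤ m := Nat.and_le_left
      omega
    | negSucc n =>
      have c2 : ¬ 0 ≤ Int.negSucc n := by rw [Int.negSucc_eq]; omega
      rw [if_neg c1, if_neg c2]
      have hlor : Int.lor (Int.negSucc m) (Int.negSucc n) = Int.negSucc (m &&& n) := rfl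
      have hm : ((-Int.negSucc m - 1).toNat) = m := by rw [Int.negSucc_eq]; omega
      have hn : ((-Int.negSucc n - 1).toNat) = n := by rw [Int.negSucc_eq]; omega
      rw [hlor, hm, hn, Int.negSucc_eq]
      omega

theorem int_ext_testBit {a b : Int} (h : ∀ k, a.testBit k = b.testBit k) : a = b := by
  cases a with
  | ofNat m =>
    cases b with
    | ofNat n =>
      have : m = n := Nat.eq_of_testBit_eq (fun i => h i)
      rw [this]
    | negSucc n =>
      exfalso
      obtain ⟨k, hk1, hk2⟩ : ∃ k, m < 2 ^ k ∧ n < 2 ^ k :=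
        ⟨m + n + 1, by
          have h1 := Nat.lt_two_pow_self (n := m + n + 1)
          omega, by
          have h1 := Nat.lt_two_pow_self (n := m + n + 1)
          omega⟩
      have hm := Nat.testBit_eq_false_of_lt hk1
      have hn := Nat.testBit_eq_false_of_lt hk2
      have := h k
      simp [Int.testBit, hm, hn] at this
  | negSucc m =>
    cases b with
    | negSucc n =>
      have : m = n := Nat.eq_of_testBit_eq (fun i => by
        have := h i
        simpa [Int.testBit] using this)
      rw [this]
    | ofNat n =>
      exfalso
      obtain ⟨k, hk1, hk2⟩ : ∃ k, m < 2 ^ k ∧ n < 2 ^ k :=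
        ⟨m + n + 1, by
          have h1 := Nat.lt_two_pow_self (n := m + n + 1)
          omega, by
          have h1 := Nat.lt_two_pow_self (n := m + n + 1)
          omega⟩
      have hm := Nat.testBit_eq_false_of_lt hk1
      have hn := Nat.testBit_eq_false_of_lt hk2
      have := h k
      simp [Int.testBit, hm, hn] at this

theorem land_lor_split (m x y : Int) :
    Int.land m (Int.lor x y) = Int.lor x y ↔ (Int.land m x = x ∧ Int.land m y = y) := by
  constructor
  · intro h
    have hk : ∀ k, (m.testBit k && (x.testBit k || y.testBit k)) = (x.testBit k || y.testBit k) := by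
      intro k
      have := congrArg (fun z => Int.testBit z k) h
      simpa [Int.testBit_land, Int.testBit_lor] using this
    refine ⟨int_ext_testBit (fun k => ?_), int_ext_testBit (fun k => ?_)⟩
    · have hh := hk k
      rw [Int.testBit_land]
      revert hh
      cases m.testBit k <;> cases x.testBit k <;> cases y.testBit k <;> simp
    · have hh := hk k
      rw [Int.testBit_land]
      revert hh
      cases m.testBit k <;> cases x.testBit k <;> cases y.testBit k <;> simp
  · rintro ⟨h1, h2⟩
    apply int_ext_testBit
    intro k
    have e1 := congrArg (fun z => Int.testBit z k) h1
    have e2 := congrArg (fun z => Int.testBit z k) h2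
    simp only [Int.testBit_land, Int.testBit_lor] at e1 e2 ⊢
    revert e1 e2
    cases m.testBit k <;> cases x.testBit k <;> cases y.testBit k <;> simp

theorem band_bor_split (m x y : Int) :
    PySem.Int.band m (PySem.Int.bor x y) = PySem.Int.bor x y ↔
      (PySem.Int.band m x = x ∧ PySem.Int.band m y = y) := by
  rw [band_eq_land, band_eq_land, band_eq_land, bor_eq_lor]
  exact land_lor_split m x y

theorem foldl_or_all (m : Int) (l : List Int) : ∀ a : Int,
    (PySem.Int.band m (l.foldl (fun c x => PySem.Int.bor c x) a)
        = l.foldl (fun c x => PySem.Int.bor c x) a) ↔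
      (PySem.Int.band m a = a ∧ ∀ c ∈ l, PySem.Int.band m c = c) := by
  induction l with
  | nil => intro a; simp
  | cons c l ih =>
    intro a
    rw [List.foldl_cons, ih (PySem.Int.bor a c), band_bor_split]
    simp only [List.mem_cons]
    constructor
    · rintro ⟨⟨ha, hc⟩, hl⟩
      exact ⟨ha, fun x hx => by rcases hx with rfl | hx; exact hc; exact hl x hx⟩
    · rintro ⟨ha, hall⟩
      exact ⟨⟨ha, hall c (Or.inl rfl)⟩, fun x hx => hall x (Or.inr hx)⟩

-- the combined OR-mask containment test equals A's per-mask all-test, for every entity mask m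
theorem comb_test_eq_all (m : Int) (acc : List Int) :
    (PySem.Int.band m (acc.foldl (fun c x => PySem.Int.bor c x) 0)
        == acc.foldl (fun c x => PySem.Int.bor c x) 0) = has_all_components m acc := by
  rw [Bool.eq_iff_iff]
  simp only [beq_iff_eq, has_all_components, has_component, List.all_eq_true]
  rw [foldl_or_all m acc 0]
  simp

-- A's per-entity decision, extracted as a predicate
def predA (acc : List Int) (rej : Option (List Int)) (em : List (Int × Int)) (eid : Int) : Bool :=
  if (match rej with | some rl => !rl.isEmpty | none => false) then
    has_all_components ((em.lookup eid).getD 0) acc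
      && !(has_any_components ((em.lookup eid).getD 0) (rej.getD []))
  else
    has_all_components ((em.lookup eid).getD 0) acc

theorem A_as_filter (eids acc : List Int) (rej : Option (List Int)) (em : List (Int × Int))
    (h : acc.isEmpty = false) :
    filter_entities_components eids acc rej em = eids.filter (predA acc rej em) := by
  unfold filter_entities_components
  have hstep : (fun (result : List Int) (entity_id : Int) =>
      if !acc.isEmpty then
        if (match rej with | some rl => !rl.isEmpty | none => false) then
          if has_all_components ((em.lookup entity_id).getD 0) acc
              && !(has_any_components ((em.lookup entity_id).getD 0) (rej.getD [])) then
            result ++ [entity_id]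
          else result
        else
          if has_all_components ((em.lookup entity_id).getD 0) acc then
            result ++ [entity_id]
          else result
      else result)
      = fun result entity_id => if predA acc rej em entity_id then result ++ [entity_id] else result := by
    funext result entity_id
    simp only [h, Bool.not_false, if_true]
    unfold predA
    cases hrej : (match rej with | some rl => !rl.isEmpty | none => false) <;> simp
  rw [hstep, PySem.List.foldl_append_if_eq_filter]
  simp

theorem filter_fixed (eids : List Int) : ∀ r : List Int,
    eids.foldl (fun (result : List Int) (_ : Int) => result) r = r := by
  induction eids with
  | nil => intro r; rfl
  | cons e l ih => intro r; exact ih r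

theorem pred_eq (acc : List Int) (rej : Option (List Int)) (em : List (Int × Int)) (eid : Int) :
    predA acc rej em eid =
      ((PySem.Int.band ((em.lookup eid).getD 0) (acc.foldl (fun c m => PySem.Int.bor c m) 0)
          == acc.foldl (fun c m => PySem.Int.bor c m) 0)
        && !((match rej with | some rl => rl | none => []).any
              (fun r => PySem.Int.band ((em.lookup eid).getD 0) r == r))) := by
  unfold predA
  rw [comb_test_eq_all]
  cases rej with
  | none => simp
  | some rl =>
    cases hrl : rl.isEmpty
    · simp only [hrl, Bool.not_false, if_true, Option.getD_some]
      rfl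
    · have : rl = [] := List.isEmpty_iff.mp hrl
      subst this
      simp

-- ===== VERDICT (by name: the statement is the Claim_ definition above) =====
theorem filter_entities_components_spec : Claim_equal_filter_entities_components := by
  unfold Claim_equal_filter_entities_components
  intro eids acc rej em _hdom _hpre
  unfold Spec_filter_entities_components
  cases hemp : acc.isEmpty
  · rw [A_as_filter eids acc rej em hemp]
    unfold filter_entities_components_alt
    rw [if_neg (by simp [hemp])]
    apply List.filter_congr
    intro e _
    exact pred_eq acc rej em e
  · unfold filter_entities_components filter_entities_components_alt
    rw [if_pos hemp]
    simp only [hemp, Bool.not_true]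
    exact filter_fixed eids []
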